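-- pv_equiv track=rewrite | github.com/aerospike/aerospike-admin | lib/collectinfo_analyzer/collectinfo_handler/collectinfo_parser/as_section_parser.py | _get_section_array_from_multicolumn_section
-- ===== SOURCE A (Python) =====
-- def _get_section_array_from_multicolumn_section(section_lines):
--     # Header line could contain any of the given delimiter.
--     delimiter_list = ["~", " Statistics", " Configuration"]
--     section_list = []
--     section = []
--     section_found = False
--
--     # If column length is smaller than header than there will be no
--     # padding with (~~). There will be no (:) in the header line.
--     for line in section_lines:
--         if ": " in line:
--             if section_found:
--                 section.append(line)
--         else:
--             for match_str in delimiter_list: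
--                 if match_str not in line:
--                     continue
--                 if section_found:
--                     section_list.append(section)
--                     section = []
--                 section_found = True
--                 break
--             if section_found:
--                 section.append(line)
--     if section_found:
--         section_list.append(section)
--     return section_list
-- ===== SOURCE B (Python) =====
-- def _get_section_array_from_multicolumn_section(section_lines):
--     # Backward single pass: walk the lines in reverse, accumulating a current
--     # group and emitting it whenever a header line is reached; the leftover
--     # prefix before the first header is discarded automatically.
--     delimiter_list = ["~", " Statistics", " Configuration"]
--
--     def is_header(line):
--         return ": " not in line and any(d in line for d in delimiter_list)
--
--     groups = []
--     cur = []
--     for line in reversed(section_lines):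
--         cur.append(line)
--         if is_header(line):
--             cur.reverse()
--             groups.append(cur)
--             cur = []
--     groups.reverse()
--     return groups
-- ===== Notes on version B (the rewrite author's own statement) =====
-- stated objective: alternative
-- what changed: Replaces the forward state machine (section_found flag, open section, inner delimiter loop with break/continue) by a single backward pass with a header predicate: groups are emitted when their header is reached and the prefix before the first header falls out automatically.
import Mathlib
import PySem

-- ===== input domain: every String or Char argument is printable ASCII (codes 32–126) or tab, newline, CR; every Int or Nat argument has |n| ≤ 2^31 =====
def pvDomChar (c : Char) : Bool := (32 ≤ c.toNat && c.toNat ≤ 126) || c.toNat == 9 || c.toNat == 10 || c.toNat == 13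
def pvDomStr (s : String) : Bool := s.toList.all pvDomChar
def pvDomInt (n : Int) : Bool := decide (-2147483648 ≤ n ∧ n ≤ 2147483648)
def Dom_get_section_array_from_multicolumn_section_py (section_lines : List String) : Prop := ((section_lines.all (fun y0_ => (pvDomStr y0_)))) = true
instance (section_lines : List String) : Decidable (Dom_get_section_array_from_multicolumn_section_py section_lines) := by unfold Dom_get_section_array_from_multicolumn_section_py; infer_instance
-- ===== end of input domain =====

-- B replaces A's forward state machine (found-flag + inner delimiter loop with break) by a
-- single backward pass that emits a group whenever its header line is reached (objective: alternative).

-- ===== PORT A =====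
def pvDelims : List String := ["~", " Statistics", " Configuration"]

-- inner 'for match_str in delimiter_list: … continue … break' loop of A
def pvDelimLoop (line : String) (st : List (List String) × List String × Bool)
    (ds : List String) : List (List String) × List String × Bool :=
  match ds with
  | [] => st
  | d :: rest =>
    if PySem.Str.isIn d line then
      match st with
      | (acc, sec, found) => (if found then acc ++ [sec] else acc, if found then [] else sec, true)
    else pvDelimLoop line st rest

def pvStepA (st : List (List String) × List String × Bool) (line : String) :
    List (List String) × List String × Bool :=
  match st with
  | (acc, sec, found) =>
    if PySem.Str.isIn ": " line then
      if found then (acc, sec ++ [line], found) else (acc, sec, found)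
    else
      match pvDelimLoop line (acc, sec, found) pvDelims with
      | (acc', sec', found') =>
        if found' then (acc', sec' ++ [line], found') else (acc', sec', found')

def get_section_array_from_multicolumn_section_py (section_lines : List String) : List (List String) :=
  match section_lines.foldl pvStepA ([], [], false) with
  | (acc, sec, found) => if found then acc ++ [sec] else acc

-- ===== PORT B =====
def pvIsHeader (line : String) : Bool :=
  !(PySem.Str.isIn ": " line) && pvDelims.any (fun d => PySem.Str.isIn d line)

-- one iteration of B's 'for line in reversed(section_lines)' loop body
def pvStepB (st : List (List String) × List String) (line : String) :
    List (List String) × List String :=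
  let cur := st.2 ++ [line]
  if pvIsHeader line then (st.1 ++ [cur.reverse], []) else (st.1, cur)

def get_section_array_from_multicolumn_section_py_alt (section_lines : List String) : List (List String) :=
  (section_lines.reverse.foldl pvStepB ([], [])).1.reverse

-- ===== PRECONDITION & SPEC =====
def Spec_get_section_array_from_multicolumn_section_py (section_lines : List String) (out : List (List String)) : Prop := out = get_section_array_from_multicolumn_section_py_alt section_lines
instance (section_lines : List String) (out : List (List String)) : Decidable (Spec_get_section_array_from_multicolumn_section_py section_lines out) := by unfold Spec_get_section_array_from_multicolumn_section_py; infer_instance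

-- ===== CLAIM (what is proved, stated in full; the proofs are below) =====
def Claim_equal_get_section_array_from_multicolumn_section_py : Prop := ∀ (section_lines : List String), Dom_get_section_array_from_multicolumn_section_py section_lines → Spec_get_section_array_from_multicolumn_section_py section_lines (get_section_array_from_multicolumn_section_py section_lines)

-- ===== LEMMAS AND PROOFS =====

-- common bridge: grouping as a structural foldr (groups in order, open prefix second)
def pvG (xs : List String) : List (List String) × List String :=
  xs.foldr
    (fun line st => if pvIsHeader line then ((line :: st.2) :: st.1, []) else (st.1, line :: st.2))
    ([], [])

theorem pvG_cons (x : String) (xs : List String) :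
    pvG (x :: xs) = if pvIsHeader x then ((x :: (pvG xs).2) :: (pvG xs).1, []) else ((pvG xs).1, x :: (pvG xs).2) := rfl

theorem pvDelimLoop_eq (line : String) (acc : List (List String)) (sec : List String)
    (found : Bool) (ds : List String) :
    pvDelimLoop line (acc, sec, found) ds =
      if ds.any (fun d => PySem.Str.isIn d line) then
        (if found then acc ++ [sec] else acc, if found then [] else sec, true)
      else (acc, sec, found) := by
  induction ds with
  | nil => simp only [pvDelimLoop, List.any_nil, Bool.false_eq_true, if_false]
  | cons d rest ih =>
    by_cases h : PySem.Str.isIn d line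
    · simp only [pvDelimLoop, h, if_true, List.any_cons, Bool.true_or]
    · simp only [pvDelimLoop, List.any_cons, Bool.not_eq_true] at *
      simp only [h, Bool.false_eq_true, if_false, Bool.false_or, ih]

theorem pvStepA_true (acc : List (List String)) (sec : List String) (line : String) :
    pvStepA (acc, sec, true) line =
      if pvIsHeader line then (acc ++ [sec], [line], true) else (acc, sec ++ [line], true) := by
  by_cases h : PySem.Str.isIn ": " line
  · have hh : pvIsHeader line = false := by
      simp only [pvIsHeader, h, Bool.not_true, Bool.false_and]
    simp only [pvStepA, h, if_true, hh, Bool.false_eq_true, if_false]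
  · simp only [Bool.not_eq_true] at h
    by_cases hm : pvDelims.any (fun d => PySem.Str.isIn d line)
    · have hh : pvIsHeader line = true := by
        simp only [pvIsHeader, h, Bool.not_false, Bool.true_and, hm]
      simp only [pvStepA, h, Bool.false_eq_true, if_false, pvDelimLoop_eq, hm, if_true, hh,
        List.nil_append]
    · simp only [Bool.not_eq_true] at hm
      have hh : pvIsHeader line = false := by
        simp only [pvIsHeader, h, Bool.not_false, Bool.true_and, hm]
      simp only [pvStepA, h, hm, hh, Bool.false_eq_true, if_false, pvDelimLoop_eq, if_true]

theorem pvStepA_false (acc : List (List String)) (line : String) :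
    pvStepA (acc, [], false) line =
      if pvIsHeader line then (acc, [line], true) else (acc, [], false) := by
  by_cases h : PySem.Str.isIn ": " line
  · have hh : pvIsHeader line = false := by
      simp only [pvIsHeader, h, Bool.not_true, Bool.false_and]
    simp only [pvStepA, h, if_true, hh, Bool.false_eq_true, if_false]
  · simp only [Bool.not_eq_true] at h
    by_cases hm : pvDelims.any (fun d => PySem.Str.isIn d line)
    · have hh : pvIsHeader line = true := by
        simp only [pvIsHeader, h, Bool.not_false, Bool.true_and, hm]
      simp only [pvStepA, h, Bool.false_eq_true, if_false, pvDelimLoop_eq, hm, if_true, hh,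
        List.nil_append]
    · simp only [Bool.not_eq_true] at hm
      have hh : pvIsHeader line = false := by
        simp only [pvIsHeader, h, Bool.not_false, Bool.true_and, hm]
      simp only [pvStepA, h, hm, hh, Bool.false_eq_true, if_false, pvDelimLoop_eq]

-- finalize A's loop state
def pvFin (st : List (List String) × List String × Bool) : List (List String) :=
  if st.2.2 then st.1 ++ [st.2.1] else st.1

theorem pvA_true (xs : List String) : ∀ (acc : List (List String)) (cur : List String),
    pvFin (xs.foldl pvStepA (acc, cur, true)) = acc ++ (cur ++ (pvG xs).2) :: (pvG xs).1 := by
  induction xs with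
  | nil => intro acc cur; simp [pvFin, pvG]
  | cons x xs ih =>
    intro acc cur
    rw [List.foldl_cons, pvStepA_true, pvG_cons]
    by_cases h : pvIsHeader x <;> simp [h, ih]

theorem pvA_false (xs : List String) : ∀ (acc : List (List String)),
    pvFin (xs.foldl pvStepA (acc, [], false)) = acc ++ (pvG xs).1 := by
  induction xs with
  | nil => intro acc; simp [pvFin, pvG]
  | cons x xs ih =>
    intro acc
    rw [List.foldl_cons, pvStepA_false, pvG_cons]
    by_cases h : pvIsHeader x <;> simp [h, ih, pvA_true]

theorem pvB_eq (xs : List String) :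
    xs.foldr (fun line st => pvStepB st line) ([], []) =
      ((pvG xs).1.reverse, (pvG xs).2.reverse) := by
  induction xs with
  | nil => simp [pvG]
  | cons x xs ih =>
    rw [List.foldr_cons, ih, pvG_cons]
    by_cases h : pvIsHeader x <;> simp [pvStepB, h]

theorem pvAlt_eq (xs : List String) :
    get_section_array_from_multicolumn_section_py_alt xs = (pvG xs).1 := by
  unfold get_section_array_from_multicolumn_section_py_alt
  rw [List.foldl_reverse, pvB_eq]
  simp

-- ===== VERDICT (by name: the statement is the Claim_ definition above) =====
theorem get_section_array_from_multicolumn_section_py_spec : Claim_equal_get_section_array_from_multicolumn_section_py := by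
  intro xs _
  show _ = _
  have hA : get_section_array_from_multicolumn_section_py xs = pvFin (xs.foldl pvStepA ([], [], false)) := by
    unfold get_section_array_from_multicolumn_section_py pvFin
    rcases xs.foldl pvStepA ([], [], false) with ⟨a, b, c⟩
    rfl
  rw [hA, pvA_false, pvAlt_eq]
  simp
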